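-- pv_equiv track=rewrite | github.com/moemza/Practice1 | practice1/python_practice.py | prime_words
-- ===== SOURCE A (Python) =====
-- def prime_words(sentence):
--     """Create a program to find the string consisting of all the words whose lengths are prime numbers.
--
--     Input:
-- The quick brown fox jumps over the lazy dog.
-- Output:
-- The quick brown fox jumps the
-- Input:
-- Omicron Effect: Foreign Flights Won't Resume On Dec 15, Decision Later.
-- Output:
-- Omicron Effect: Foreign Flights Won't On Dec 15,
--
--     Args:
--         sentence (str): _description_
--     """
--
--
--     def is_prime(n):   #Check if a number is prime
--         if n <= 1:
--             return False
--         for i in range(2, int(n**0.5) + 1):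
--             if n % i == 0:
--                 return False
--         return True
--
--     new_list = []
--     list_words = sentence.split()  # Split the sentence into words
--
--     for words in list_words:
--         lenword = len(words)
--         if lenword > 1 and is_prime(lenword):  # Check if length is prime
--             new_list.append(words)
--
--     return ' '.join(new_list)
-- ===== SOURCE B (Python) =====
-- def prime_words(sentence):
--     words = sentence.split()
--     if not words:
--         return ''
--     m = max(len(w) for w in words)
--     composite = [False] * (m + 1)
--     for p in range(2, m + 1):
--         for q in range(2 * p, m + 1, p):
--             composite[q] = True
--     return ' '.join(w for w in words if len(w) >= 2 and not composite[len(w)])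
-- ===== Notes on version B (the rewrite author's own statement) =====
-- stated objective: alternative
-- what changed: A trial-divides each word's length up to its square root; B precomputes one Sieve of Eratosthenes table over 0..max word length in a separate pass and then filters the words against that table.
import Mathlib
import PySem

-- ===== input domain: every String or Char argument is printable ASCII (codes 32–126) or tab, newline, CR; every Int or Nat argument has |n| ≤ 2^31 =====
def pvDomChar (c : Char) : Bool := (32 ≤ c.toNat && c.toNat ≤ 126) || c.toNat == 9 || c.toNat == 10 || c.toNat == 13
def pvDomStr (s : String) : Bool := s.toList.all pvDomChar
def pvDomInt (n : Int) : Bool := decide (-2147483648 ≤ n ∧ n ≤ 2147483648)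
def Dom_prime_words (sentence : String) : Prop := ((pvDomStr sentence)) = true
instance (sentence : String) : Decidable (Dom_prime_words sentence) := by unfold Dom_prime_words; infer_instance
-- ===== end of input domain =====

-- B replaces A's per-word trial division by one Sieve of Eratosthenes pass over 0..max word length
-- followed by a filter; alternative algorithm, same observable behaviour.

-- ===== PORT A =====
-- int(n**0.5) is ported as Nat.sqrt, exact for the word lengths reachable here (n < 2^53)
def pwIsPrime (n : Int) : Bool :=
  if n ≤ 1 then false
  else (PySem.List.pyRange 2 ((Nat.sqrt n.toNat : Int) + 1)).all
    (fun i => !(PySem.Int.mod n i == 0))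

def prime_words (sentence : String) : String :=
  let list_words := PySem.Str.split₀ sentence
  let new_list := list_words.foldl (fun acc w =>
    let lenword := PySem.Str.len w
    if (decide (1 < lenword) && pwIsPrime lenword) = true then acc ++ [w] else acc)
    ([] : List String)
  PySem.Str.join " " new_list

-- ===== PORT B =====
def pwSieve (m : Int) : List Bool :=
  (PySem.List.pyRange 2 (m + 1)).foldl (fun comp p =>
    (PySem.List.pyRange (2 * p) (m + 1) p).foldl (fun comp q => comp.set q.toNat true) comp)
    (List.replicate (m + 1).toNat false)

def prime_words_alt (sentence : String) : String :=
  let words := PySem.Str.split₀ sentence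
  if words = [] then ""
  else
    let m := (words.map (fun w => PySem.Str.len w)).foldl max 0
    let comp := pwSieve m
    PySem.Str.join " " (words.filter (fun w =>
      decide (2 ≤ PySem.Str.len w) && !(comp.getD (PySem.Str.len w).toNat false)))

-- ===== PRECONDITION & SPEC =====
def Spec_prime_words (sentence : String) (out : String) : Prop := out = prime_words_alt sentence
instance (sentence : String) (out : String) : Decidable (Spec_prime_words sentence out) := by unfold Spec_prime_words; infer_instance

-- ===== CLAIM (what is proved, stated in full; the proofs are below) =====
def Claim_equal_prime_words : Prop := ∀ (sentence : String), Dom_prime_words sentence → Spec_prime_words sentence (prime_words sentence)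

-- ===== LEMMAS AND PROOFS =====

-- A's trial division decides primality of the length
theorem pwIsPrime_iff (n : Nat) : pwIsPrime (n : Int) = true ↔ Nat.Prime n := by
  unfold pwIsPrime
  by_cases h : (n : Int) ≤ 1
  · rw [if_pos h]
    constructor
    · intro hc; exact absurd hc (by simp)
    · intro hp; exact absurd hp.two_le (by omega)
  · rw [if_neg h, List.all_eq_true, Nat.prime_def_le_sqrt]
    simp only [Int.toNat_natCast]
    constructor
    · intro hall
      refine ⟨by omega, fun d h2 hle hdvd => ?_⟩
      have := hall (d : Int) (by
        rw [PySem.List.mem_pyRange_one]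
        constructor
        · exact_mod_cast h2
        · exact_mod_cast (by omega : (d:Int) < (Nat.sqrt n : Int) + 1))
      simp only [Bool.not_eq_true', beq_eq_false_iff_ne, ne_eq] at this
      exact this (by rw [PySem.Int.mod_eq_zero_iff_dvd]; exact_mod_cast hdvd)
    · rintro ⟨h2, hnd⟩ i hi
      rw [PySem.List.mem_pyRange_one] at hi
      simp only [Bool.not_eq_true', beq_eq_false_iff_ne, ne_eq]
      rw [PySem.Int.mod_eq_zero_iff_dvd]
      intro hdvd
      have hipos : 0 < i := by omega
      have : i = ((i.toNat : Nat) : Int) := by omega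
      rw [this] at hdvd
      have : (i.toNat : Nat) ∣ n := by exact_mod_cast hdvd
      exact hnd i.toNat (by omega) (by omega) this

-- marking a batch of in-range indices true: final value at k = initial value OR k among the indices
theorem getD_foldl_set (ls : List Int) (init : List Bool) (k : Nat)
    (h : ∀ i ∈ ls, 0 ≤ i ∧ i.toNat < init.length) :
    (ls.foldl (fun c i => c.set i.toNat true) init).getD k false
      = (init.getD k false || decide ((k : Int) ∈ ls)) := by
  induction ls generalizing init with
  | nil => simp
  | cons i tl ih =>
    simp only [List.foldl_cons]
    rw [ih _ (by intro j hj; have := h j (List.mem_cons_of_mem _ hj); simpa using this)]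
    have hi := h i (List.mem_cons_self ..)
    by_cases hk : (k : Int) = i
    · have hk' : i.toNat = k := by omega
      subst hk'
      rw [List.getD_eq_getElem?_getD, List.getD_eq_getElem?_getD,
        List.getElem?_set_self (by omega)]
      simp [hk]
    · have hk' : i.toNat ≠ k := by omega
      simp [List.getD_eq_getElem?_getD, List.getElem?_set_ne hk', List.mem_cons, hk]

-- the sieve marks k (k ≤ m) iff k has a divisor p with 2 ≤ p and 2p ≤ k
theorem pwSieve_getD (m k : Nat) (hk : k ≤ m) :
    (pwSieve (m : Int)).getD k false = true ↔ ∃ p : Nat, 2 ≤ p ∧ p ∣ k ∧ 2 * p ≤ k := by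
  unfold pwSieve
  rw [← List.foldl_flatMap, getD_foldl_set]
  · have hrep : (List.replicate ((m : Int) + 1).toNat false).getD k false = false := by
      simp [List.getD_eq_getElem?_getD, hk]
    rw [hrep]
    simp only [Bool.false_or, decide_eq_true_eq, List.mem_flatMap]
    constructor
    · rintro ⟨p, hp, hq⟩
      rw [PySem.List.mem_pyRange_one] at hp
      have hppos : 0 < p := by omega
      rw [PySem.List.mem_pyRange_iff_of_pos hppos] at hq
      obtain ⟨h1, h2, h3⟩ := hq
      have hpd : p ∣ (k : Int) := by
        have : p ∣ ((k : Int) - 2 * p) + 2 * p := Dvd.dvd.add h3 ⟨2, by ring⟩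
        simpa using this
      refine ⟨p.toNat, by omega, ?_, by omega⟩
      have : ((p.toNat : Nat) : Int) ∣ (k : Int) := by
        have : p = ((p.toNat : Nat) : Int) := by omega
        rwa [this] at hpd
      exact_mod_cast this
    · rintro ⟨p, hp2, hpd, hp3⟩
      refine ⟨(p : Int), ?_, ?_⟩
      · rw [PySem.List.mem_pyRange_one]
        constructor
        · exact_mod_cast hp2
        · omega
      · rw [PySem.List.mem_pyRange_iff_of_pos (by exact_mod_cast (by omega : 0 < p))]
        refine ⟨by exact_mod_cast hp3, by omega, ?_⟩
        have : (p : Int) ∣ (k : Int) := by exact_mod_cast hpd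
        exact Dvd.dvd.sub this ⟨2, by ring⟩
  · intro i hi
    rw [List.mem_flatMap] at hi
    obtain ⟨p, hp, hq⟩ := hi
    rw [PySem.List.mem_pyRange_one] at hp
    rw [PySem.List.mem_pyRange_iff_of_pos (by omega)] at hq
    constructor
    · omega
    · simp only [List.length_replicate]; omega

-- a composite n ≥ 2 has a divisor p with 2 ≤ p and 2p ≤ n, and conversely
theorem composite_iff (n : Nat) (h2 : 2 ≤ n) :
    (∃ p : Nat, 2 ≤ p ∧ p ∣ n ∧ 2 * p ≤ n) ↔ ¬ Nat.Prime n := by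
  constructor
  · rintro ⟨p, hp2, hpd, hpn⟩ hprime
    rcases (Nat.Prime.eq_one_or_self_of_dvd hprime p hpd) with h | h <;> omega
  · intro hnp
    rw [Nat.prime_def_lt] at hnp
    push Not at hnp
    obtain ⟨d, hdn, hdd, hd1⟩ := hnp h2
    have hd0 : d ≠ 0 := by rintro rfl; rw [Nat.zero_dvd] at hdd; omega
    obtain ⟨c, hc⟩ := hdd
    have hc2 : 2 ≤ c := by
      rcases Nat.lt_or_ge c 2 with h | h
      · interval_cases c <;> omega
      · exact h
    exact ⟨d, by omega, ⟨c, hc⟩, by nlinarith⟩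

-- ===== VERDICT (by name: the statement is the Claim_ definition above) =====
theorem prime_words_spec : Claim_equal_prime_words := by
  intro sentence _
  unfold Spec_prime_words prime_words prime_words_alt
  set words := PySem.Str.split₀ sentence with hw
  by_cases hnil : words = []
  · simp [hnil, PySem.Str.join]
  · simp only [hnil, if_neg, not_false_iff]
    have hfold := PySem.List.foldl_append_if
      (fun w => decide (1 < PySem.Str.len w) && pwIsPrime (PySem.Str.len w)) id words []
    simp only [id] at hfold
    rw [hfold]
    simp only [List.nil_append, List.map_id]
    congr 1
    apply List.filter_congr
    intro w hwmem
    set m := (words.map (fun w => PySem.Str.len w)).foldl max 0 with hm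
    have hm0 : 0 ≤ m := (PySem.List.le_foldl_max _ 0).1
    have hlen : PySem.Str.len w = (w.toList.length : Int) := by
      simp [PySem.Str.len]
    have hle : PySem.Str.len w ≤ m :=
      (PySem.List.le_foldl_max _ 0).2 _ (List.mem_map.mpr ⟨w, hwmem, rfl⟩)
    set n : Nat := w.toList.length with hn
    have hcast : PySem.Str.len w = (n : Int) := hlen
    rw [hcast]
    have hmM : m = ((m.toNat : Nat) : Int) := by omega
    have hkM : n ≤ m.toNat := by omega
    by_cases h2 : 2 ≤ n
    · have hsieve := pwSieve_getD m.toNat n hkM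
      rw [← hmM] at hsieve
      by_cases hp : Nat.Prime n
      · have hA : pwIsPrime (n : Int) = true := (pwIsPrime_iff n).mpr hp
        have hB : (pwSieve m).getD n false = false := by
          rcases Bool.eq_false_or_eq_true ((pwSieve m).getD n false) with h | h
          · exact absurd ((composite_iff n h2).mp (hsieve.mp h)) (not_not.mpr hp)
          · exact h
        rw [List.getD_eq_getElem?_getD] at hB
        simp [hA, hB, Int.toNat_natCast, show (1 : Int) < n by omega,
          show (2 : Int) ≤ n by omega]
      · have hA : pwIsPrime (n : Int) = false := by
          rcases Bool.eq_false_or_eq_true (pwIsPrime (n : Int)) with h | h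
          · exact absurd ((pwIsPrime_iff n).mp h) hp
          · exact h
        have hB : (pwSieve m).getD n false = true :=
          hsieve.mpr ((composite_iff n h2).mpr hp)
        rw [List.getD_eq_getElem?_getD] at hB
        simp [hA, hB, Int.toNat_natCast]
    · have hA : pwIsPrime (n : Int) = false := by
        unfold pwIsPrime
        simp [show (n : Int) ≤ 1 by omega]
      simp [hA, Int.toNat_natCast, show ¬ (2 : Int) ≤ (n : Int) by omega]
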